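-- pv_equiv track=rewrite | github.com/maurixavi/CaDQM-phase2-dq-assessment-backend | dqmodel/ai_modules/dq_dimension_factor_recommender.py | expand_context_components
-- ===== SOURCE A (Python) =====
-- def expand_context_components(abbreviated: dict) -> dict:
--     """Expande los componentes de contexto abreviados a su forma completa"""
--     expanded = {}
--
--     if "appDomain" in abbreviated:
--         expanded["applicationDomain"] = [
--             {"name": item["n"], "id": item["id"]} for item in abbreviated["appDomain"]
--         ]
--     if "bizRule" in abbreviated:
--         expanded["businessRule"] = [
--             {"statement": item["s"], "id": item["id"], "semantic": item["sem"]}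
--             for item in abbreviated["bizRule"]
--         ]
--     if "dataFilter" in abbreviated:
--         expanded["dataFiltering"] = [
--             {"statement": item["s"], "id": item["id"], "description": item["desc"], "taskAtHandId": item["task"]}
--             for item in abbreviated["dataFilter"]
--         ]
--     if "dqMeta" in abbreviated:
--         expanded["dqMetadata"] = [
--             {"path": item["p"], "id": item["id"], "description": item["desc"], "measuredMetrics": item["meas"]}
--             for item in abbreviated["dqMeta"]
--         ]
--     if "dqReq" in abbreviated:
--         expanded["dqRequirement"] = [
--             {"statement": item["s"], "id": item["id"], "description": item["desc"], "dataFilterIds": item["dataFilterIds"], "userTypeId": item["userTypeId"]}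
--             for item in abbreviated["dqReq"]
--         ]
--     if "otherData" in abbreviated:
--         expanded["otherData"] = [
--             {"path": item["p"], "id": item["id"], "description": item["desc"], "owner": item["own"]}
--             for item in abbreviated["otherData"]
--         ]
--     if "otherMeta" in abbreviated:
--         expanded["otherMetadata"] = [
--             {"path": item["p"], "id": item["id"], "description": item["desc"], "author": item["auth"], "lastUpdated": item["lastUpd"]}
--             for item in abbreviated["otherMeta"]
--         ]
--     if "sysReq" in abbreviated:
--         expanded["systemRequirement"] = [
--             {"statement": item["s"], "id": item["id"], "description": item["desc"]}
--             for item in abbreviated["sysReq"]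
--         ]
--     if "task" in abbreviated:
--         expanded["taskAtHand"] = [
--             {"name": item["n"], "id": item["id"], "purpose": item["purp"]}
--             for item in abbreviated["task"]
--         ]
--     if "userType" in abbreviated:
--         expanded["userType"] = [
--             {"name": item["n"], "id": item["id"], "characteristics": item["char"]}
--             for item in abbreviated["userType"]
--         ]
--
--     return expanded
-- ===== SOURCE B (Python) =====
-- SPEC = {
--     "appDomain": (0, "applicationDomain", (("name", "n"), ("id", "id"))),
--     "bizRule": (1, "businessRule", (("statement", "s"), ("id", "id"), ("semantic", "sem"))),
--     "dataFilter": (2, "dataFiltering", (("statement", "s"), ("id", "id"), ("description", "desc"), ("taskAtHandId", "task"))),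
--     "dqMeta": (3, "dqMetadata", (("path", "p"), ("id", "id"), ("description", "desc"), ("measuredMetrics", "meas"))),
--     "dqReq": (4, "dqRequirement", (("statement", "s"), ("id", "id"), ("description", "desc"), ("dataFilterIds", "dataFilterIds"), ("userTypeId", "userTypeId"))),
--     "otherData": (5, "otherData", (("path", "p"), ("id", "id"), ("description", "desc"), ("owner", "own"))),
--     "otherMeta": (6, "otherMetadata", (("path", "p"), ("id", "id"), ("description", "desc"), ("author", "auth"), ("lastUpdated", "lastUpd"))),
--     "sysReq": (7, "systemRequirement", (("statement", "s"), ("id", "id"), ("description", "desc"))),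
--     "task": (8, "taskAtHand", (("name", "n"), ("id", "id"), ("purpose", "purp"))),
--     "userType": (9, "userType", (("name", "n"), ("id", "id"), ("characteristics", "char"))),
-- }
--
--
-- def expand_context_components(abbreviated: dict) -> dict:
--     """Expande los componentes de contexto abreviados a su forma completa"""
--     # traverse the INPUT (not the schema): collect a rank-tagged row per known key,
--     # then restore the canonical section order by a stable sort on the rank
--     rows = []
--     for key, items in abbreviated.items():
--         spec = SPEC.get(key)
--         if spec is not None:
--             rank, full, fields = spec
--             rows.append((rank, full, [{f: item[a] for f, a in fields} for item in items]))
--     rows.sort(key=lambda r: r[0])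
--     return {full: value for _, full, value in rows}
-- ===== Notes on version B (the rewrite author's own statement) =====
-- stated objective: alternative
-- what changed: A scans the ten-section schema in its fixed order and checks each key against the input; B traverses the INPUT's entries instead, tags each recognised section with a schema rank, and restores the canonical section order by a stable sort on the rank.
import Mathlib
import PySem

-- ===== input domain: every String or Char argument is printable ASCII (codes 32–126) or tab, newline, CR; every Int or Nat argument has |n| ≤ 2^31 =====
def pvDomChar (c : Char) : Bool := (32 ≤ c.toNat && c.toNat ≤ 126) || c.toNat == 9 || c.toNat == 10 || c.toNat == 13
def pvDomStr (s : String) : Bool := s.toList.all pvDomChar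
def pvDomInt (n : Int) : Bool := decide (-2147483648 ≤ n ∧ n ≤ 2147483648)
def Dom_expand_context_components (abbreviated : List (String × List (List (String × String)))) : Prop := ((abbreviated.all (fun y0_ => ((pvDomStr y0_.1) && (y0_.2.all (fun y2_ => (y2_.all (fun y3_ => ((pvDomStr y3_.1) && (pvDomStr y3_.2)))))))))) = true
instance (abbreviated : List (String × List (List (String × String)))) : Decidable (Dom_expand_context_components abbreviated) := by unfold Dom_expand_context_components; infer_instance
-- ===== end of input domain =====

-- B traverses the input's entries (not the schema), tags each recognised section with a rank,
-- and restores the canonical order by a stable sort on the rank (alternative, same cost).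
-- item["k"] is ported as getD with default ""; inputs where Python raises KeyError are excluded by Pre_.

-- ===== PORT A =====
-- literal transliteration of A: ten if-blocks, each inserting a hardcoded list of field pairs
def expand_context_components (abbreviated : List (String × List (List (String × String)))) : List (String × List (List (String × String))) :=
  let d : PySem.Dict String (List (List (String × String))) := PySem.Dict.mk abbreviated
  let expanded : PySem.Dict String (List (List (String × String))) := PySem.Dict.empty
  let expanded := if d.contains "appDomain" then
      expanded.insert "applicationDomain" (((d.get? "appDomain").getD []).map (fun item =>
        [("name", (PySem.Dict.mk item).getD "n" ""), ("id", (PySem.Dict.mk item).getD "id" "")]))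
    else expanded
  let expanded := if d.contains "bizRule" then
      expanded.insert "businessRule" (((d.get? "bizRule").getD []).map (fun item =>
        [("statement", (PySem.Dict.mk item).getD "s" ""), ("id", (PySem.Dict.mk item).getD "id" ""), ("semantic", (PySem.Dict.mk item).getD "sem" "")]))
    else expanded
  let expanded := if d.contains "dataFilter" then
      expanded.insert "dataFiltering" (((d.get? "dataFilter").getD []).map (fun item =>
        [("statement", (PySem.Dict.mk item).getD "s" ""), ("id", (PySem.Dict.mk item).getD "id" ""), ("description", (PySem.Dict.mk item).getD "desc" ""), ("taskAtHandId", (PySem.Dict.mk item).getD "task" "")]))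
    else expanded
  let expanded := if d.contains "dqMeta" then
      expanded.insert "dqMetadata" (((d.get? "dqMeta").getD []).map (fun item =>
        [("path", (PySem.Dict.mk item).getD "p" ""), ("id", (PySem.Dict.mk item).getD "id" ""), ("description", (PySem.Dict.mk item).getD "desc" ""), ("measuredMetrics", (PySem.Dict.mk item).getD "meas" "")]))
    else expanded
  let expanded := if d.contains "dqReq" then
      expanded.insert "dqRequirement" (((d.get? "dqReq").getD []).map (fun item =>
        [("statement", (PySem.Dict.mk item).getD "s" ""), ("id", (PySem.Dict.mk item).getD "id" ""), ("description", (PySem.Dict.mk item).getD "desc" ""), ("dataFilterIds", (PySem.Dict.mk item).getD "dataFilterIds" ""), ("userTypeId", (PySem.Dict.mk item).getD "userTypeId" "")]))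
    else expanded
  let expanded := if d.contains "otherData" then
      expanded.insert "otherData" (((d.get? "otherData").getD []).map (fun item =>
        [("path", (PySem.Dict.mk item).getD "p" ""), ("id", (PySem.Dict.mk item).getD "id" ""), ("description", (PySem.Dict.mk item).getD "desc" ""), ("owner", (PySem.Dict.mk item).getD "own" "")]))
    else expanded
  let expanded := if d.contains "otherMeta" then
      expanded.insert "otherMetadata" (((d.get? "otherMeta").getD []).map (fun item =>
        [("path", (PySem.Dict.mk item).getD "p" ""), ("id", (PySem.Dict.mk item).getD "id" ""), ("description", (PySem.Dict.mk item).getD "desc" ""), ("author", (PySem.Dict.mk item).getD "auth" ""), ("lastUpdated", (PySem.Dict.mk item).getD "lastUpd" "")]))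
    else expanded
  let expanded := if d.contains "sysReq" then
      expanded.insert "systemRequirement" (((d.get? "sysReq").getD []).map (fun item =>
        [("statement", (PySem.Dict.mk item).getD "s" ""), ("id", (PySem.Dict.mk item).getD "id" ""), ("description", (PySem.Dict.mk item).getD "desc" "")]))
    else expanded
  let expanded := if d.contains "task" then
      expanded.insert "taskAtHand" (((d.get? "task").getD []).map (fun item =>
        [("name", (PySem.Dict.mk item).getD "n" ""), ("id", (PySem.Dict.mk item).getD "id" ""), ("purpose", (PySem.Dict.mk item).getD "purp" "")]))
    else expanded
  let expanded := if d.contains "userType" then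
      expanded.insert "userType" (((d.get? "userType").getD []).map (fun item =>
        [("name", (PySem.Dict.mk item).getD "n" ""), ("id", (PySem.Dict.mk item).getD "id" ""), ("characteristics", (PySem.Dict.mk item).getD "char" "")]))
    else expanded
  expanded.items

-- ===== PORT B =====
-- Source B's SPEC: abbreviated key ↦ (rank, full key, [(full_field, abbrev_field), …])
def ecSpec : PySem.Dict String (Nat × String × List (String × String)) := PySem.Dict.mk
  [ ("appDomain", (0, "applicationDomain", [("name", "n"), ("id", "id")])),
    ("bizRule", (1, "businessRule", [("statement", "s"), ("id", "id"), ("semantic", "sem")])),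
    ("dataFilter", (2, "dataFiltering", [("statement", "s"), ("id", "id"), ("description", "desc"), ("taskAtHandId", "task")])),
    ("dqMeta", (3, "dqMetadata", [("path", "p"), ("id", "id"), ("description", "desc"), ("measuredMetrics", "meas")])),
    ("dqReq", (4, "dqRequirement", [("statement", "s"), ("id", "id"), ("description", "desc"), ("dataFilterIds", "dataFilterIds"), ("userTypeId", "userTypeId")])),
    ("otherData", (5, "otherData", [("path", "p"), ("id", "id"), ("description", "desc"), ("owner", "own")])),
    ("otherMeta", (6, "otherMetadata", [("path", "p"), ("id", "id"), ("description", "desc"), ("author", "auth"), ("lastUpdated", "lastUpd")])),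
    ("sysReq", (7, "systemRequirement", [("statement", "s"), ("id", "id"), ("description", "desc")])),
    ("task", (8, "taskAtHand", [("name", "n"), ("id", "id"), ("purpose", "purp")])),
    ("userType", (9, "userType", [("name", "n"), ("id", "id"), ("characteristics", "char")])) ]

-- literal transliteration of Source B: collect rank-tagged rows from the INPUT's entries, sort by rank, project
def expand_context_components_alt (abbreviated : List (String × List (List (String × String)))) : List (String × List (List (String × String))) :=
  let rows := abbreviated.filterMap (fun kv =>
    (ecSpec.get? kv.1).map (fun spec =>
      (spec.1, spec.2.1, kv.2.map (fun item =>
        spec.2.2.map (fun fp => (fp.1, (PySem.Dict.mk item).getD fp.2 ""))))))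
  (PySem.List.sorted rows (fun r => r.1)).map (fun r => (r.2.1, r.2.2))

-- ===== PRECONDITION & SPEC =====
-- Pre_ excludes (a) inputs where Python's A raises KeyError (an item of a recognised section missing
-- one of that section's abbreviated field keys) and (b) association lists with duplicate top-level
-- keys, which never arise from a Python dict (the argument's type).
def Pre_expand_context_components (abbreviated : List (String × List (List (String × String)))) : Prop :=
  (abbreviated.map Prod.fst).Nodup ∧
  (abbreviated.all (fun kv =>
    ((ecSpec.get? kv.1).getD (0, "", [])).2.2.all (fun fp =>
      kv.2.all (fun item => (PySem.Dict.mk item).contains fp.2)))) = true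
instance (abbreviated : List (String × List (List (String × String)))) : Decidable (Pre_expand_context_components abbreviated) := by unfold Pre_expand_context_components; infer_instance

def pvWitness_expand_context_components : (List (String × List (List (String × String)))) :=
  [("task", [[("n", "t"), ("id", "2"), ("purp", "p")]]), ("appDomain", [[("n", "ctx"), ("id", "1")]]), ("junk", [[]])]

def Spec_expand_context_components (abbreviated : List (String × List (List (String × String)))) (out : List (String × List (List (String × String)))) : Prop := out = expand_context_components_alt abbreviated
instance (abbreviated : List (String × List (List (String × String)))) (out : List (String × List (List (String × String)))) : Decidable (Spec_expand_context_components abbreviated out) := by unfold Spec_expand_context_components; infer_instance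

-- ===== CLAIM =====
def Claim_equal_expand_context_components : Prop := ∀ (abbreviated : List (String × List (List (String × String)))), Dom_expand_context_components abbreviated → Pre_expand_context_components abbreviated → Spec_expand_context_components abbreviated (expand_context_components abbreviated)

-- ===== LEMMAS AND PROOFS =====

-- the rank-decorated canonical row list, in schema order (proof-side helper)
def pvTarget (abbreviated : List (String × List (List (String × String)))) : List (Nat × String × List (List (String × String))) :=
  ecSpec.items.filterMap (fun row =>
    if (PySem.Dict.mk abbreviated).contains row.1 then
      some (row.2.1, row.2.2.1, (((PySem.Dict.mk abbreviated).get? row.1).getD []).map (fun item =>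
        row.2.2.2.map (fun fp => (fp.1, (PySem.Dict.mk item).getD fp.2 ""))))
    else none)

-- B's row list, as a named definition (identical to the `rows` let of the B port)
def pvRows (abbreviated : List (String × List (List (String × String)))) : List (Nat × String × List (List (String × String))) :=
  abbreviated.filterMap (fun kv =>
    (ecSpec.get? kv.1).map (fun spec =>
      (spec.1, spec.2.1, kv.2.map (fun item =>
        spec.2.2.map (fun fp => (fp.1, (PySem.Dict.mk item).getD fp.2 ""))))))

lemma ite_some_eq_some {α : Type} {c : Prop} [Decidable c] {x e : α} :
    ((if c then some e else none) = some x) ↔ (c ∧ e = x) := by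
  split <;> simp_all

-- a fold of conditional inserts over fresh distinct keys appends exactly the passing rows
lemma items_foldl_insert_if_fresh {κ ν β : Type} [BEq κ] [LawfulBEq κ]
    (l : List β) (c : β → Bool) (k : β → κ) (v : β → ν) (d : PySem.Dict κ ν)
    (hf : ∀ a ∈ l, d.contains (k a) = false) (hn : (l.map k).Nodup) :
    (l.foldl (fun e a => if c a then e.insert (k a) (v a) else e) d).items
      = d.items ++ l.filterMap (fun a => if c a then some (k a, v a) else none) := by
  induction l generalizing d with
  | nil => simp
  | cons a l ih =>
    simp only [List.map_cons, List.nodup_cons] at hn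
    by_cases hc : c a
    · simp only [List.foldl_cons, List.filterMap_cons, if_pos hc]
      rw [ih _ ?_ hn.2]
      · rw [PySem.Dict.items_insert_of_not_contains d (v a) (hf a (List.mem_cons_self ..))]
        simp
      · intro b hb
        rw [PySem.Dict.contains_insert]
        simp only [Bool.or_eq_false_iff]
        refine ⟨?_, hf b (List.mem_cons_of_mem _ hb)⟩
        simp only [beq_eq_false_iff_ne, ne_eq]
        intro he
        exact hn.1 (he ▸ List.mem_map_of_mem hb)
    · simp only [List.foldl_cons, List.filterMap_cons, if_neg hc]
      exact ih _ (fun b hb => hf b (List.mem_cons_of_mem _ hb)) hn.2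

lemma A_eq_target (abbreviated : List (String × List (List (String × String)))) :
    expand_context_components abbreviated = (pvTarget abbreviated).map (fun r => (r.2.1, r.2.2)) := by
  have h0 : expand_context_components abbreviated =
      (ecSpec.items.foldl (fun e row =>
        if (PySem.Dict.mk abbreviated).contains row.1 then
          e.insert row.2.2.1 ((((PySem.Dict.mk abbreviated).get? row.1).getD []).map (fun item =>
            row.2.2.2.map (fun fp => (fp.1, (PySem.Dict.mk item).getD fp.2 ""))))
        else e) PySem.Dict.empty).items := rfl
  have h1 := items_foldl_insert_if_fresh ecSpec.items
    (fun row => (PySem.Dict.mk abbreviated).contains row.1)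
    (fun row => row.2.2.1)
    (fun row => (((PySem.Dict.mk abbreviated).get? row.1).getD []).map (fun item =>
      row.2.2.2.map (fun fp => (fp.1, (PySem.Dict.mk item).getD fp.2 ""))))
    PySem.Dict.empty (fun a _ => rfl) (by decide)
  rw [h0, h1]
  simp [pvTarget, List.map_filterMap, apply_ite]
  rfl

lemma target_pairwise (abbreviated : List (String × List (List (String × String)))) :
    (pvTarget abbreviated).Pairwise (fun a b => a.1 < b.1) := by
  unfold pvTarget
  rw [List.pairwise_filterMap]
  have h : ecSpec.items.Pairwise (fun a b => a.2.1 < b.2.1) := by decide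
  refine h.imp ?_
  intro a b hab x hx y hy
  rw [ite_some_eq_some] at hx hy
  rw [← hx.2, ← hy.2]
  exact hab

lemma target_nodup (abbreviated : List (String × List (List (String × String)))) :
    (pvTarget abbreviated).Nodup :=
  (target_pairwise abbreviated).imp (fun h => by intro he; subst he; exact lt_irrefl _ h)

-- distinct schema keys carry distinct ranks
lemma rk_inj : ∀ (a b : String) (c : Nat),
    c ∈ (ecSpec.get? a).map (fun s => s.1) → c ∈ (ecSpec.get? b).map (fun s => s.1) → a = b := by
  intro a b c h1 h2
  rw [Option.mem_def, Option.map_eq_some_iff] at h1 h2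
  obtain ⟨s, hs, hsc⟩ := h1
  obtain ⟨t, ht, htc⟩ := h2
  have hsa := PySem.Dict.mem_items_of_get?_eq_some _ hs
  have hta := PySem.Dict.mem_items_of_get?_eq_some _ ht
  have key : ∀ p ∈ ecSpec.items, ∀ q ∈ ecSpec.items, p.2.1 = q.2.1 → p.1 = q.1 := by decide
  exact key (a, s) hsa (b, t) hta (by rw [hsc, htc])

lemma rows_nodup (abbreviated : List (String × List (List (String × String))))
    (hnd : (abbreviated.map Prod.fst).Nodup) : (pvRows abbreviated).Nodup := by
  apply List.Nodup.of_map (f := fun r => r.1)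
  have h1 : (pvRows abbreviated).map (fun r => r.1)
      = (abbreviated.map Prod.fst).filterMap (fun k => (ecSpec.get? k).map (fun s => s.1)) := by
    unfold pvRows
    rw [List.map_filterMap, List.filterMap_map]
    simp [Function.comp_def, Option.map_map]
  rw [h1]
  exact List.Nodup.filterMap rk_inj hnd

lemma mem_target_iff_mem_rows (abbreviated : List (String × List (List (String × String))))
    (hnd : (abbreviated.map Prod.fst).Nodup) (x : Nat × String × List (List (String × String))) :
    x ∈ pvTarget abbreviated ↔ x ∈ pvRows abbreviated := by
  have hkeys : (PySem.Dict.mk abbreviated).keys.Nodup := hnd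
  unfold pvTarget pvRows
  simp only [List.mem_filterMap, ite_some_eq_some, Option.map_eq_some_iff]
  constructor
  · rintro ⟨row, hrow, hc, hx⟩
    obtain ⟨v, hv⟩ : ∃ v, (PySem.Dict.mk abbreviated).get? row.1 = some v := by
      rw [PySem.Dict.contains_eq_isSome_get?] at hc
      exact Option.isSome_iff_exists.1 hc
    refine ⟨(row.1, v), PySem.Dict.mem_items_of_get?_eq_some _ hv, row.2, ?_, ?_⟩
    · exact PySem.Dict.get?_of_mem_items _ hrow (by decide)
    · rw [← hx, hv]
      rfl
  · rintro ⟨kv, hkv, spec, hspec, hx⟩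
    have hmem : (kv.1, spec) ∈ ecSpec.items := PySem.Dict.mem_items_of_get?_eq_some _ hspec
    have hget : (PySem.Dict.mk abbreviated).get? kv.1 = some kv.2 :=
      PySem.Dict.get?_of_mem_items _ hkv hkeys
    refine ⟨(kv.1, spec), hmem, ?_, ?_⟩
    · rw [PySem.Dict.contains_eq_isSome_get?, hget]; rfl
    · rw [hget]; exact hx

lemma sorted_rows_eq_target (abbreviated : List (String × List (List (String × String))))
    (hnd : (abbreviated.map Prod.fst).Nodup) :
    PySem.List.sorted (pvRows abbreviated) (fun r => r.1) = pvTarget abbreviated :=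
  PySem.List.sorted_eq_of_perm_of_pairwise_lt _ _ _
    ((List.perm_ext_iff_of_nodup (target_nodup abbreviated) (rows_nodup abbreviated hnd)).2
      (mem_target_iff_mem_rows abbreviated hnd))
    (target_pairwise abbreviated)

-- ===== VERDICT =====
theorem expand_context_components_spec : Claim_equal_expand_context_components := by
  intro abbreviated _ hpre
  unfold Spec_expand_context_components
  have hB : expand_context_components_alt abbreviated
      = (PySem.List.sorted (pvRows abbreviated) (fun r => r.1)).map (fun r => (r.2.1, r.2.2)) := rfl
  rw [hB, sorted_rows_eq_target abbreviated hpre.1, A_eq_target]
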